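-- pv_equiv track=rewrite | github.com/alvaropena-ibm/GESTION_DEMANDA_CLEAN | cognito-auth-package/lambda-auth-authorizer/app_config.py | get_app_for_route
-- ===== SOURCE A (Python) =====
-- APP_TO_ROUTES = {
--     "credentials_management_application": [
--         "/api/users/*",
--         "/api/credentials/*",  # Incluye /api/credentials/tokens, /api/credentials/access-keys, etc.
--         "/api/applications/*",
--         "/api/permissions/*",
--         "/api/audit/*",
--         "/api/notifications/*"
--     ],
--     "bedrock_usage_dashboard": [
--         "/api/bedrock/*",  # Incluye /api/bedrock/models, /api/bedrock/usage, /api/bedrock/metrics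
--     ],
--     "knowledge_base_agent_chat": [
--         "/api/knowledge-base/chat/*"
--     ],
--     "knowledge_base_agent_document_management": [
--         "/api/knowledge-base/documents/*"
--     ],
--     "knowledge_base_usage_dashboard": [
--         "/api/knowledge-base/usage/*",
--         "/api/knowledge-base/metrics/*"
--     ],
--     "sap_newco_batch_monitoring": [
--         "/api/sap/batch/*",
--         "/api/sap/monitoring/*"
--     ],
--     "test_planning_agent": [
--         "/api/test-planning/*"
--     ],
--     "capacity_planning_application": [
--         "/api/capacity-planning/*"
--     ]
-- }
--
-- def get_app_for_route(route):
--     """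
--     Determina qué aplicación corresponde a una ruta
--
--     Args:
--         route (str): Ruta solicitada
--
--     Returns:
--         str: Nombre de la aplicación o None si no se encuentra
--     """
--     for app, routes in APP_TO_ROUTES.items():
--         for route_pattern in routes:
--             if route_pattern.endswith("/*"):
--                 route_prefix = route_pattern[:-2]
--                 if route.startswith(route_prefix):
--                     return app
--             elif route == route_pattern:
--                 return app
--
--     return None
-- ===== SOURCE B (Python) =====
-- # Prefix-indexed lookup: build once a dict prefix -> app, then probe the
-- # route's own prefixes with hash lookups instead of scanning every pattern.
-- APP_TO_ROUTES = {
--     "credentials_management_application": [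
--         "/api/users/*",
--         "/api/credentials/*",
--         "/api/applications/*",
--         "/api/permissions/*",
--         "/api/audit/*",
--         "/api/notifications/*"
--     ],
--     "bedrock_usage_dashboard": [
--         "/api/bedrock/*",
--     ],
--     "knowledge_base_agent_chat": [
--         "/api/knowledge-base/chat/*"
--     ],
--     "knowledge_base_agent_document_management": [
--         "/api/knowledge-base/documents/*"
--     ],
--     "knowledge_base_usage_dashboard": [
--         "/api/knowledge-base/usage/*",
--         "/api/knowledge-base/metrics/*"
--     ],
--     "sap_newco_batch_monitoring": [
--         "/api/sap/batch/*",
--         "/api/sap/monitoring/*"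
--     ],
--     "test_planning_agent": [
--         "/api/test-planning/*"
--     ],
--     "capacity_planning_application": [
--         "/api/capacity-planning/*"
--     ]
-- }
--
-- PREFIX_TO_APP = {
--     pattern[:-2]: app
--     for app, routes in APP_TO_ROUTES.items()
--     for pattern in routes
-- }
--
-- MAX_PREFIX_LEN = max(map(len, PREFIX_TO_APP))
--
-- def get_app_for_route(route):
--     for i in range(min(len(route), MAX_PREFIX_LEN) + 1):
--         app = PREFIX_TO_APP.get(route[:i])
--         if app is not None:
--             return app
--     return None
-- ===== Notes on version B (the rewrite author's own statement) =====
-- stated objective: idiomatic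
-- what changed: Replaces A's nested scan testing startswith against every pattern with a prefix->app dict built once; the route's own prefixes route[:i] are probed by hash lookup, valid because the configured prefixes never nest.
import Mathlib
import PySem

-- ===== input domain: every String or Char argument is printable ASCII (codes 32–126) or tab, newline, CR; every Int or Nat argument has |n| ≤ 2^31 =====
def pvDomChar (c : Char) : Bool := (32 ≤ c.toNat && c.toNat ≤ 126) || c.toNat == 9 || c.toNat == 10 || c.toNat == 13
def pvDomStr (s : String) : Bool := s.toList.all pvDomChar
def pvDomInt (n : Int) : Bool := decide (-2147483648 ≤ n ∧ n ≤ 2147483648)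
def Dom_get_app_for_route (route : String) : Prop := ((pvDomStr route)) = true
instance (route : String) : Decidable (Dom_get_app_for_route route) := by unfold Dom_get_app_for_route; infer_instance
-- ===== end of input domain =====

-- B replaces A's nested scan over every route pattern by a prefix→app dict built
-- once, probed with the route's own prefixes (objective: idiomatic hash lookup).

-- ===== PORT A =====
def pvAppToRoutes : List (String × List String) := [
  ("credentials_management_application", [
    "/api/users/*",
    "/api/credentials/*",
    "/api/applications/*",
    "/api/permissions/*",
    "/api/audit/*",
    "/api/notifications/*"]),
  ("bedrock_usage_dashboard", ["/api/bedrock/*"]),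
  ("knowledge_base_agent_chat", ["/api/knowledge-base/chat/*"]),
  ("knowledge_base_agent_document_management", ["/api/knowledge-base/documents/*"]),
  ("knowledge_base_usage_dashboard", [
    "/api/knowledge-base/usage/*",
    "/api/knowledge-base/metrics/*"]),
  ("sap_newco_batch_monitoring", [
    "/api/sap/batch/*",
    "/api/sap/monitoring/*"]),
  ("test_planning_agent", ["/api/test-planning/*"]),
  ("capacity_planning_application", ["/api/capacity-planning/*"])]

-- inner 'for route_pattern in routes' loop of A
def pvPatLoop (route app : String) : List String → Option String
  | [] => none
  | pat :: rest =>
    if PySem.Str.endswith pat "/*" then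
      if PySem.Str.startswith route (PySem.Str.slice pat none (some (-2))) then some app
      else pvPatLoop route app rest
    else if route = pat then some app
    else pvPatLoop route app rest

-- outer 'for app, routes in APP_TO_ROUTES.items()' loop of A
def pvAppLoop (route : String) : List (String × List String) → Option String
  | [] => none
  | (app, routes) :: rest =>
    match pvPatLoop route app routes with
    | some a => some a
    | none => pvAppLoop route rest

def get_app_for_route (route : String) : Option String :=
  pvAppLoop route pvAppToRoutes

-- ===== PORT B =====
-- PREFIX_TO_APP = { pattern[:-2]: app for app, routes in APP_TO_ROUTES.items() for pattern in routes }
def pvPrefixToApp : PySem.Dict String String :=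
  pvAppToRoutes.foldl
    (fun d p => p.2.foldl (fun d pat => d.insert (PySem.Str.slice pat none (some (-2))) p.1) d)
    PySem.Dict.empty

-- MAX_PREFIX_LEN = max(map(len, PREFIX_TO_APP))
def pvMaxPrefixLen : Int :=
  match PySem.List.max? (pvPrefixToApp.keys.map PySem.Str.len) id with
  | some m => m
  | none => 0  -- unreachable: the dict literal is nonempty (Python max would raise there)

-- 'for i in range(min(len(route), MAX_PREFIX_LEN) + 1): …' loop of B
def pvScan (route : String) : List Int → Option String
  | [] => none
  | i :: rest =>
    match pvPrefixToApp.get? (PySem.Str.slice route none (some i)) with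
    | some app => some app
    | none => pvScan route rest

def get_app_for_route_alt (route : String) : Option String :=
  pvScan route (PySem.List.pyRange 0 (min (PySem.Str.len route) pvMaxPrefixLen + 1) 1)

-- ===== PRECONDITION & SPEC =====
def Spec_get_app_for_route (route : String) (out : Option String) : Prop := out = get_app_for_route_alt route
instance (route : String) (out : Option String) : Decidable (Spec_get_app_for_route route out) := by unfold Spec_get_app_for_route; infer_instance

-- ===== CLAIM (what is proved, stated in full; the proofs are below) =====
def Claim_equal_get_app_for_route : Prop := ∀ (route : String), Dom_get_app_for_route route → Spec_get_app_for_route route (get_app_for_route route)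

-- ===== LEMMAS AND PROOFS =====

-- the 14 (prefix, app) pairs, in A's iteration order
def pvPrefixes : List (String × String) := [
  ("/api/users", "credentials_management_application"),
  ("/api/credentials", "credentials_management_application"),
  ("/api/applications", "credentials_management_application"),
  ("/api/permissions", "credentials_management_application"),
  ("/api/audit", "credentials_management_application"),
  ("/api/notifications", "credentials_management_application"),
  ("/api/bedrock", "bedrock_usage_dashboard"),
  ("/api/knowledge-base/chat", "knowledge_base_agent_chat"),
  ("/api/knowledge-base/documents", "knowledge_base_agent_document_management"),
  ("/api/knowledge-base/usage", "knowledge_base_usage_dashboard"),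
  ("/api/knowledge-base/metrics", "knowledge_base_usage_dashboard"),
  ("/api/sap/batch", "sap_newco_batch_monitoring"),
  ("/api/sap/monitoring", "sap_newco_batch_monitoring"),
  ("/api/test-planning", "test_planning_agent"),
  ("/api/capacity-planning", "capacity_planning_application")]

lemma pvDict_eq : pvPrefixToApp = PySem.Dict.mk pvPrefixes := by decide

lemma pvKeyLen : ∀ pr ∈ pvPrefixes, pr.1.toList.length ≤ 29 := by decide

lemma pvKeys_nodup : (PySem.Dict.mk pvPrefixes).keys.Nodup := by decide

-- no configured prefix is a proper prefix of another
lemma pvNoNest : ∀ pr ∈ pvPrefixes, ∀ qr ∈ pvPrefixes,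
    pr.1.toList.isPrefixOf qr.1.toList = true → pr.1 = qr.1 := by decide

-- every configured pattern ends with "/*"
lemma pvAllStar : ∀ pr ∈ pvAppToRoutes, ∀ pat ∈ pr.2, PySem.Str.endswith pat "/*" = true := by
  decide

-- flattening the table into (prefix, app) pairs gives pvPrefixes
lemma pvFlatten :
    pvAppToRoutes.flatMap
      (fun pr => pr.2.map (fun pat => (PySem.Str.slice pat none (some (-2)), pr.1))) = pvPrefixes := by
  decide

lemma pvPatLoop_eq (r app : String) (pats : List String)
    (h : ∀ pat ∈ pats, PySem.Str.endswith pat "/*" = true) :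
    pvPatLoop r app pats =
      (List.find? (fun pr => PySem.Str.startswith r pr.1)
        (pats.map (fun pat => (PySem.Str.slice pat none (some (-2)), app)))).map (·.2) := by
  induction pats with
  | nil => rfl
  | cons pat rest ih =>
    rw [pvPatLoop, if_pos (h pat (List.mem_cons_self ..)), List.map_cons, List.find?_cons]
    cases hs : PySem.Str.startswith r (PySem.Str.slice pat none (some (-2))) with
    | true => simp
    | false => simp [ih (fun q hq => h q (List.mem_cons_of_mem _ hq))]

lemma pvAppLoop_eq (r : String) (tbl : List (String × List String))
    (h : ∀ pr ∈ tbl, ∀ pat ∈ pr.2, PySem.Str.endswith pat "/*" = true) :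
    pvAppLoop r tbl =
      (List.find? (fun pr => PySem.Str.startswith r pr.1)
        (tbl.flatMap
          (fun pr => pr.2.map (fun pat => (PySem.Str.slice pat none (some (-2)), pr.1))))).map (·.2) := by
  induction tbl with
  | nil => rfl
  | cons e rest ih =>
    obtain ⟨app, routes⟩ := e
    rw [pvAppLoop, List.flatMap_cons, List.find?_append,
      pvPatLoop_eq r app routes (h (app, routes) (List.mem_cons_self ..))]
    cases List.find? (fun pr => PySem.Str.startswith r pr.1)
        (routes.map (fun pat => (PySem.Str.slice pat none (some (-2)), app))) with
    | some pa => rfl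
    | none => simpa using ih (fun q hq pat hp => h q (List.mem_cons_of_mem _ hq) pat hp)

-- A's loops compute the first pair whose prefix starts the route
lemma pvA_eq (r : String) :
    get_app_for_route r =
      (pvPrefixes.find? (fun pr => PySem.Str.startswith r pr.1)).map (·.2) := by
  rw [get_app_for_route, pvAppLoop_eq r pvAppToRoutes pvAllStar, pvFlatten]

lemma pvGet_eq_some (s x : String) :
    pvPrefixToApp.get? s = some x ↔ (s, x) ∈ pvPrefixes := by
  rw [pvDict_eq, PySem.Dict.get?_eq_some_iff_mem_items _ _ _ pvKeys_nodup]

lemma pvScan_map (r : String) (ks : List Nat) :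
    pvScan r (List.map (fun k => ((k : Nat) : Int)) ks) =
      ks.findSome? (fun k : Nat => pvPrefixToApp.get? (PySem.Str.slice r none (some (k : Int)))) := by
  induction ks with
  | nil => rfl
  | cons k ks ih =>
    rw [List.map_cons, List.findSome?_cons, pvScan, ih]
    cases pvPrefixToApp.get? (PySem.Str.slice r none (some (k : Int))) <;> rfl

lemma pvSlice_toList (r : String) (k : Nat) :
    (PySem.Str.slice r none (some (k : Int))).toList = r.toList.take k := by
  rw [PySem.Str.toList_slice, PySem.Chars.slice_eq_listSlice,
    PySem.List.slice_to _ (by positivity)]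
  simp

lemma pvFindSome_range_some {g : Nat → Option String} {N m : Nat} {a : String}
    (hm : m < N) (hg : g m = some a) (h0 : ∀ k < N, k ≠ m → g k = none) :
    (List.range N).findSome? g = some a := by
  induction N with
  | zero => omega
  | succ N ih =>
    rw [List.range_succ, List.findSome?_append]
    rcases Nat.lt_or_ge m N with h | h
    · rw [ih h (fun k hk hne => h0 k (by omega) hne)]; rfl
    · have hmN : m = N := by omega
      have : (List.range N).findSome? g = none := by
        rw [List.findSome?_eq_none_iff]
        intro k hk
        exact h0 k (by simp at hk; omega) (by simp at hk; omega)
      rw [this]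
      simp [hmN ▸ hg]

theorem pv_main (route : String) : get_app_for_route route = get_app_for_route_alt route := by
  rw [pvA_eq]
  unfold get_app_for_route_alt
  have hlen : PySem.Str.len route = (route.toList.length : Int) := by
    simp [PySem.Str.len_eq]
  have hb : min (PySem.Str.len route) pvMaxPrefixLen + 1
      = ((min route.toList.length 29 + 1 : Nat) : Int) := by
    rw [hlen, show pvMaxPrefixLen = 29 from by decide]; push_cast; ring_nf
  rw [hb, PySem.List.pyRange_zero_natCast, pvScan_map]
  set n := route.toList.length with hn
  set N := min n 29 + 1 with hN
  -- characterize the probe at index k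
  have hprobe : ∀ (k : Nat) (x : String), pvPrefixToApp.get? (PySem.Str.slice route none (some (k : Int))) = some x ↔
      (PySem.Str.slice route none (some (k : Int)), x) ∈ pvPrefixes := fun k x => pvGet_eq_some _ _
  cases hfind : pvPrefixes.find? (fun pr => PySem.Str.startswith route pr.1) with
  | none =>
    have hnone : ∀ (k : Nat), pvPrefixToApp.get? (PySem.Str.slice route none (some (k : Int))) = none := by
      intro k
      cases hx : pvPrefixToApp.get? (PySem.Str.slice route none (some (k : Int))) with
      | none => rfl
      | some x =>
        exfalso
        have hmem := (hprobe k x).mp hx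
        have := List.find?_eq_none.mp hfind _ hmem
        simp only [PySem.Str.startswith_eq] at this
        exact this ((PySem.Chars.startswith_iff _ _).mpr (pvSlice_toList route k ▸ List.take_prefix k route.toList))
    rw [List.findSome?_eq_none_iff.mpr (fun k _ => hnone k)]
    rfl
  | some pa =>
    obtain ⟨p, a⟩ := pa
    have hmem : (p, a) ∈ pvPrefixes := List.mem_of_find?_eq_some hfind
    have hpref : p.toList <+: route.toList := by
      have := List.find?_some hfind
      simpa [PySem.Chars.startswith_iff] using this
    set m := p.toList.length with hm
    have hmn : m ≤ n := hpref.length_le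
    have hm29 : m ≤ 29 := pvKeyLen (p, a) hmem
    -- the probe succeeds exactly at k = m, with value a
    have hgm : pvPrefixToApp.get? (PySem.Str.slice route none (some (m : Int))) = some a := by
      have hkey : PySem.Str.slice route none (some (m : Int)) = p := by
        apply String.toList_inj.mp
        rw [pvSlice_toList]
        exact (List.prefix_iff_eq_take.mp hpref).symm
      rw [hkey]
      exact (pvGet_eq_some p a).mpr hmem
    have h0 : ∀ k < N, k ≠ m →
        pvPrefixToApp.get? (PySem.Str.slice route none (some (k : Int))) = none := by
      intro k hk hne
      cases hx : pvPrefixToApp.get? (PySem.Str.slice route none (some (k : Int))) with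
      | none => rfl
      | some x =>
        exfalso
        have hxmem := (hprobe k x).mp hx
        set q := PySem.Str.slice route none (some (k : Int)) with hq
        have hqlen : q.toList.length = k := by
          rw [pvSlice_toList, List.length_take]; omega
        have hqpref : q.toList <+: route.toList := pvSlice_toList route k ▸ List.take_prefix k route.toList
        have hqp : q = p := by
          rcases Nat.le_total q.toList.length p.toList.length with h | h
          · exact pvNoNest (q, x) hxmem (p, a) hmem
              (List.isPrefixOf_iff_prefix.mpr (List.prefix_of_prefix_length_le hqpref hpref h))
          · exact (pvNoNest (p, a) hmem (q, x) hxmem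
              (List.isPrefixOf_iff_prefix.mpr (List.prefix_of_prefix_length_le hpref hqpref h))).symm
        apply hne
        rw [← hqlen, hqp]
    rw [pvFindSome_range_some (g := fun k : Nat => pvPrefixToApp.get? (PySem.Str.slice route none (some (k : Int))))
      (by omega : m < N) hgm h0]
    rfl

-- ===== VERDICT (by name: the statement is the Claim_ definition above) =====
theorem get_app_for_route_spec : Claim_equal_get_app_for_route := by
  intro route _
  unfold Spec_get_app_for_route
  exact pv_main route
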